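-- pv_equiv track=rewrite | github.com/mere-human/core-python-ex | 9/9.16/linebrk.py | find_last_word_pos
-- ===== SOURCE A (Python) =====
-- def find_last_word_pos(text, start=None):
--     if start is None:
--         start = len(text)-1
--     has_nonspace = False
--     i = start
--     while i > 0:
--         if text[i].isspace():
--             if has_nonspace:
--                 break
--         else:
--             has_nonspace = True
--         i -= 1
--     return i
-- ===== SOURCE B (Python) =====
-- def find_last_word_pos(text, start=None):
--     i = len(text) - 1 if start is None else start
--     if i <= 0:
--         return i
--     ans = last_ws = 0
--     for j in range(1, i + 1):
--         if text[j].isspace():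
--             last_ws = j
--         else:
--             ans = last_ws
--     return ans
-- ===== Notes on version B (the rewrite author's own statement) =====
-- stated objective: alternative
-- what changed: Replaces A's backward flag-driven scan from the end with a single forward pass over indices 1..start that maintains an accumulator pair (last boundary, last whitespace index), returning the accumulated boundary.
import Mathlib
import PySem

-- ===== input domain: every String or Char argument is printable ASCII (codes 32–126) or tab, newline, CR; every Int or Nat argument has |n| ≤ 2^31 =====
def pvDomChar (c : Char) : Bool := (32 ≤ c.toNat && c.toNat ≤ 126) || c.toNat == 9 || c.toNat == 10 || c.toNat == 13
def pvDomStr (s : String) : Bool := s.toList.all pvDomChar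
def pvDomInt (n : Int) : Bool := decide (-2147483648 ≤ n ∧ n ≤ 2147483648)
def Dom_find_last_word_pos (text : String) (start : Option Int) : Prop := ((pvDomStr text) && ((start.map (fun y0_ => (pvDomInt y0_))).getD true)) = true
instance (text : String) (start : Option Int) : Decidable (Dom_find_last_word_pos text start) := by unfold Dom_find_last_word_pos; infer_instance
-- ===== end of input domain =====

-- B replaces A's backward flag-driven scan with a single forward pass keeping
-- an accumulator pair (last boundary, last whitespace index) (objective: alternative).

-- ===== PORT A =====
-- the while loop of A: state (i, has_nonspace); on an out-of-range index Python
-- raises IndexError (pyGet? = none) — those inputs are excluded by Pre_; the port returns i there.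
def pvLoopA (cs : List Char) (i : Int) (has_nonspace : Bool) : Int :=
  if 0 < i then
    match PySem.List.pyGet? cs i with
    | none => i
    | some c =>
      if PySem.Chars.isspace c then
        if has_nonspace then i else pvLoopA cs (i - 1) has_nonspace
      else pvLoopA cs (i - 1) true
  else i
termination_by i.toNat
decreasing_by all_goals (simp_all)

def find_last_word_pos (text : String) (start : Option Int) : Int :=
  let s : Int := match start with
    | none => (text.toList.length : Int) - 1
    | some v => v
  pvLoopA text.toList s false

-- ===== PORT B =====
-- the body of Source B's for loop: state (ans, last_ws); an out-of-range index is an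
-- IndexError in Python (pyGet? = none) — excluded by Pre_; the port keeps the state there.
def pvStepB (cs : List Char) (st : Int × Int) (j : Int) : Int × Int :=
  match PySem.List.pyGet? cs j with
  | none => st
  | some c => if PySem.Chars.isspace c then (st.1, j) else (st.2, st.2)

def find_last_word_pos_alt (text : String) (start : Option Int) : Int :=
  let i : Int := match start with
    | none => (text.toList.length : Int) - 1
    | some v => v
  if i ≤ 0 then i
  else ((PySem.List.pyRange 1 (i + 1) 1).foldl (pvStepB text.toList) (0, 0)).1

-- ===== PRECONDITION & SPEC =====
-- Pre_ excludes exactly the inputs where both Pythons raise IndexError: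
-- an explicit start with 0 < start ≥ len(text) (an access text[j] with j ≥ len is reached).
def Pre_find_last_word_pos (text : String) (start : Option Int) : Prop :=
  match start with
  | none => True
  | some s => s ≤ 0 ∨ s < (text.toList.length : Int)
instance (text : String) (start : Option Int) : Decidable (Pre_find_last_word_pos text start) := by unfold Pre_find_last_word_pos; cases start <;> infer_instance

def pvWitness_find_last_word_pos : String × Option Int := ("hello  world ", none)

def Spec_find_last_word_pos (text : String) (start : Option Int) (out : Int) : Prop := out = find_last_word_pos_alt text start
instance (text : String) (start : Option Int) (out : Int) : Decidable (Spec_find_last_word_pos text start out) := by unfold Spec_find_last_word_pos; infer_instance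

-- ===== CLAIM (what is proved, stated in full; the proofs are below) =====
def Claim_equal_find_last_word_pos : Prop := ∀ (text : String) (start : Option Int), Dom_find_last_word_pos text start → Pre_find_last_word_pos text start → Spec_find_last_word_pos text start (find_last_word_pos text start)

-- ===== LEMMAS AND PROOFS =====

-- A's loop below or at i trivially returns i when i ≤ 0.
theorem pvLoopA_nonpos (cs : List Char) (i : Int) (b : Bool) (h : i ≤ 0) :
    pvLoopA cs i b = i := by
  rw [pvLoopA]; simp [show ¬ 0 < i by omega]

-- The forward fold up to n computes the pair (A's loop with flag unset, A's loop with flag set).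
theorem pvFold_eq_pvLoopA (cs : List Char) (n : Nat) (hn : n < cs.length) :
    (PySem.List.pyRange 1 ((n : Int) + 1) 1).foldl (pvStepB cs) (0, 0)
      = (pvLoopA cs (n : Int) false, pvLoopA cs (n : Int) true) := by
  induction n with
  | zero =>
    rw [PySem.List.pyRange_one_eq_nil (by norm_num)]
    simp [pvLoopA_nonpos]
  | succ n ih =>
    have hn' : n < cs.length := Nat.lt_of_succ_lt hn
    have hcast : ((n + 1 : Nat) : Int) = (n : Int) + 1 := by push_cast; ring
    rw [hcast, PySem.List.pyRange_one_succ_right (by omega), List.foldl_append,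
        ih hn']
    have hget : PySem.List.pyGet? cs ((n : Int) + 1) = some cs[n + 1] := by
      rw [show ((n : Int) + 1) = ((n + 1 : Nat) : Int) by push_cast; ring,
          PySem.List.pyGet?_natCast]
      exact List.getElem?_eq_getElem hn
    have hA : ∀ b, pvLoopA cs ((n : Int) + 1) b
        = if PySem.Chars.isspace cs[n + 1] then
            (if b then (n : Int) + 1 else pvLoopA cs (n : Int) b)
          else pvLoopA cs (n : Int) true := by
      intro b
      rw [pvLoopA]
      simp only [show (0 : Int) < (n : Int) + 1 by omega, if_pos, hget,
        show (n : Int) + 1 - 1 = (n : Int) by ring]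
    simp only [List.foldl_cons, List.foldl_nil, pvStepB, hget, hA]
    by_cases hs : PySem.Chars.isspace cs[n + 1] <;> simp [hs]

-- Both sides as a single statement about the character list and the resolved start index.
theorem pvKey (cs : List Char) (i : Int) (hlt : i ≤ 0 ∨ i < (cs.length : Int)) :
    pvLoopA cs i false
      = if i ≤ 0 then i
        else ((PySem.List.pyRange 1 (i + 1) 1).foldl (pvStepB cs) (0, 0)).1 := by
  by_cases hle : i ≤ 0
  · rw [if_pos hle, pvLoopA_nonpos cs i false hle]
  · have hilt : i < (cs.length : Int) := hlt.resolve_left hle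
    have hn : i = ((i.toNat : Nat) : Int) := by omega
    have hnlt : i.toNat < cs.length := by omega
    rw [if_neg hle, hn, pvFold_eq_pvLoopA cs i.toNat hnlt]

-- ===== VERDICT (by name: the statement is the Claim_ definition above) =====
theorem find_last_word_pos_spec : Claim_equal_find_last_word_pos := by
  intro text start _ hpre
  unfold Spec_find_last_word_pos find_last_word_pos find_last_word_pos_alt
  cases start with
  | none =>
    show pvLoopA text.toList ((text.toList.length : Int) - 1) false = _
    exact pvKey text.toList _ (by omega)
  | some s =>
    show pvLoopA text.toList s false = _
    exact pvKey text.toList s (by unfold Pre_find_last_word_pos at hpre; exact hpre)
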